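-- pv_equiv track=rewrite | github.com/hyunjongkimmath/trouver | trouver/markdown/obsidian/personal/machine_learning/tokenize.py | _min_max_char_ind_for_seq
-- ===== SOURCE A (Python) =====
-- def _min_max_char_ind_for_seq(
--         offset_for_seq: list[tuple[int,int]] # An item in tokenized['offset_mapping']
--         ):
--     min_char_ind, max_char_ind = 0, 0
--     for inds in offset_for_seq:
--         if inds != (0,0):
--             min_char_ind = inds[0]
--             break
--     for inds in reversed(offset_for_seq):
--         if inds != (0,0):
--             max_char_ind = inds[1]
--             break
--     return min_char_ind, max_char_ind
-- ===== SOURCE B (Python) =====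
-- def _min_max_char_ind_for_seq(
--         offset_for_seq: list[tuple[int,int]] # An item in tokenized['offset_mapping']
--         ):
--     # Single forward pass: first non-(0,0) sets the min once; every non-(0,0) overwrites the max.
--     min_char_ind, max_char_ind = 0, 0
--     found = False
--     for inds in offset_for_seq:
--         if inds != (0, 0):
--             max_char_ind = inds[1]
--             if not found:
--                 min_char_ind = inds[0]
--                 found = True
--     return min_char_ind, max_char_ind
-- ===== Notes on version B (the rewrite author's own statement) =====
-- stated objective: simpler
-- what changed: Replaces A's two scans (a forward scan for the min and a scan over reversed(...) for the max, each with break) by one forward pass with a 'found' flag that sets the min once and keeps overwriting the max.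
import Mathlib
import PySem

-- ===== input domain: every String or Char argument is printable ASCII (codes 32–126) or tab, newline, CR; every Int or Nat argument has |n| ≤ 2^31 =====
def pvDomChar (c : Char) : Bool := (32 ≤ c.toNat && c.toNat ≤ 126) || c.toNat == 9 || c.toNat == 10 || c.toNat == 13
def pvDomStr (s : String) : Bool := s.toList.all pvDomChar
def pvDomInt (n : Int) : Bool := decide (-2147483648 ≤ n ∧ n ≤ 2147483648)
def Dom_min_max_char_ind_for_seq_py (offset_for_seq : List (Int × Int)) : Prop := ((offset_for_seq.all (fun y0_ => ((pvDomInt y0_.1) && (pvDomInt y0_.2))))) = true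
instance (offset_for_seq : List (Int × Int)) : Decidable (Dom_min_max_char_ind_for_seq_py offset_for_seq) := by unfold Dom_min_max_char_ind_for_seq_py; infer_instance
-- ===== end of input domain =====

-- B replaces A's forward scan + reversed scan (each with break) by one forward pass
-- with a 'found' flag; objective: simpler.


-- ===== PORT A =====
-- A's first loop: scan forward, break at the first inds ≠ (0,0), taking inds[0]; default is the initial 0.
def pvAFirst : List (Int × Int) → Int → Int
  | [], mn => mn
  | p :: rest, mn => if p ≠ (0, 0) then p.1 else pvAFirst rest mn

-- A's second loop: scan reversed(offset_for_seq), break at the first inds ≠ (0,0), taking inds[1].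
def pvALast : List (Int × Int) → Int → Int
  | [], mx => mx
  | p :: rest, mx => if p ≠ (0, 0) then p.2 else pvALast rest mx

def min_max_char_ind_for_seq_py (offset_for_seq : List (Int × Int)) : Int × Int :=
  (pvAFirst offset_for_seq 0, pvALast offset_for_seq.reverse 0)

-- ===== PORT B =====
-- B's single forward loop over (min, max, found).
def pvBLoop : List (Int × Int) → Int → Int → Bool → Int × Int
  | [], mn, mx, _ => (mn, mx)
  | p :: rest, mn, mx, found =>
    if p ≠ (0, 0) then
      pvBLoop rest (if found then mn else p.1) p.2 true
    else
      pvBLoop rest mn mx found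

def min_max_char_ind_for_seq_py_alt (offset_for_seq : List (Int × Int)) : Int × Int :=
  pvBLoop offset_for_seq 0 0 false

-- ===== PRECONDITION & SPEC =====
def Spec_min_max_char_ind_for_seq_py (offset_for_seq : List (Int × Int)) (out : Int × Int) : Prop := out = min_max_char_ind_for_seq_py_alt offset_for_seq
instance (offset_for_seq : List (Int × Int)) (out : Int × Int) : Decidable (Spec_min_max_char_ind_for_seq_py offset_for_seq out) := by unfold Spec_min_max_char_ind_for_seq_py; infer_instance

-- ===== CLAIM (what is proved, stated in full; the proofs are below) =====
def Claim_equal_min_max_char_ind_for_seq_py : Prop := ∀ (offset_for_seq : List (Int × Int)), Dom_min_max_char_ind_for_seq_py offset_for_seq → Spec_min_max_char_ind_for_seq_py offset_for_seq (min_max_char_ind_for_seq_py offset_for_seq)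

-- ===== LEMMAS AND PROOFS =====
-- Left-to-right accumulator version of "last non-(0,0)'s second component, else default".
def pvLastAcc : List (Int × Int) → Int → Int
  | [], mx => mx
  | p :: rest, mx => pvLastAcc rest (if p ≠ (0, 0) then p.2 else mx)

lemma pvALast_append (ys : List (Int × Int)) (p : Int × Int) (d : Int) :
    pvALast (ys ++ [p]) d = pvALast ys (if p ≠ (0, 0) then p.2 else d) := by
  induction ys with
  | nil => simp [pvALast]
  | cons q ys ih => by_cases h : q = (0, 0) <;> simp [pvALast, h, ih]

lemma pvALast_reverse (xs : List (Int × Int)) (d : Int) :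
    pvALast xs.reverse d = pvLastAcc xs d := by
  induction xs generalizing d with
  | nil => rfl
  | cons p xs ih => simp [List.reverse_cons, pvALast_append, pvLastAcc, ih]

lemma pvBLoop_eq (xs : List (Int × Int)) (mn mx : Int) (found : Bool) :
    pvBLoop xs mn mx found =
      ((if found then mn else pvAFirst xs mn), pvLastAcc xs mx) := by
  induction xs generalizing mn mx found with
  | nil => cases found <;> simp [pvBLoop, pvAFirst, pvLastAcc]
  | cons p xs ih =>
    by_cases h : p = (0, 0) <;> cases found <;>
      simp [pvBLoop, pvAFirst, pvLastAcc, h, ih]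

-- ===== VERDICT (by name: the statement is the Claim_ definition above) =====
theorem min_max_char_ind_for_seq_py_spec : Claim_equal_min_max_char_ind_for_seq_py := by
  intro xs _
  show min_max_char_ind_for_seq_py xs = min_max_char_ind_for_seq_py_alt xs
  simp [min_max_char_ind_for_seq_py, min_max_char_ind_for_seq_py_alt,
    pvBLoop_eq, pvALast_reverse]
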